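-- pv_equiv track=rewrite | github.com/teymuri/klarenz | src/helper.py | dur_to_onset
-- ===== SOURCE A (Python) =====
-- def dur_to_onset(durs, initos=0):
--     """Returns a list of (accumulated onset, corresponding duration).
--     The initial onset is the desired starting onset."""
--     durs = list(durs) # convert to pop
--     onsets = []
--     while durs:
--         d = durs.pop(0)
--         onsets.append((d, initos))
--         initos += d
--     return onsets
-- ===== SOURCE B (Python) =====
-- from itertools import accumulate
--
-- def dur_to_onset(durs, initos=0):
--     """Returns a list of (duration, accumulated onset) pairs.
--     The initial onset is the desired starting onset."""
--     durs = list(durs)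
--     onsets = list(accumulate([initos, *durs]))
--     return list(zip(durs, onsets[:-1]))
-- ===== Notes on version B (the rewrite author's own statement) =====
-- stated objective: idiomatic
-- what changed: Replaces the destructive while/pop(0) loop threading a running accumulator with a separate prefix-sum pass (itertools.accumulate) followed by zip with the durations.
import Mathlib
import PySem

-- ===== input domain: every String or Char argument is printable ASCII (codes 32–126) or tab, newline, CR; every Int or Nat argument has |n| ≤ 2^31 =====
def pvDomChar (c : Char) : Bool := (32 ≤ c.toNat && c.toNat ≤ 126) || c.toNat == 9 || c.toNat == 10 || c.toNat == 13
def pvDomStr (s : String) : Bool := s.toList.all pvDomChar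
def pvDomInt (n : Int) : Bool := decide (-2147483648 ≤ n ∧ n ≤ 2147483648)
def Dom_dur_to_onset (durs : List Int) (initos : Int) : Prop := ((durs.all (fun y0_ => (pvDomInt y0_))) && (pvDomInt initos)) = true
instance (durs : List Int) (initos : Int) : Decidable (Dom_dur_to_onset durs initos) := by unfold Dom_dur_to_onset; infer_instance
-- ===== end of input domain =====

-- B replaces A's destructive pop(0) loop with a prefix-sum pass plus zip (idiomatic one-pass decomposition).

-- ===== PORT A =====
-- while durs: d = durs.pop(0); onsets.append((d, initos)); initos += d
def durToOnsetLoopA : List Int → Int → List (Int × Int) → List (Int × Int)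
  | [], _, onsets => onsets
  | d :: rest, os, onsets => durToOnsetLoopA rest (os + d) (onsets ++ [(d, os)])

def dur_to_onset (durs : List Int) (initos : Int) : List (Int × Int) :=
  durToOnsetLoopA durs initos []

-- ===== PORT B =====
-- accumulate([initos, *durs]): the prefix sums, starting with initos
def pvAccum : Int → List Int → List Int
  | x, [] => [x]
  | x, d :: rest => x :: pvAccum (x + d) rest

def dur_to_onset_alt (durs : List Int) (initos : Int) : List (Int × Int) :=
  durs.zip (pvAccum initos durs).dropLast

-- ===== PRECONDITION & SPEC =====
def Spec_dur_to_onset (durs : List Int) (initos : Int) (out : List (Int × Int)) : Prop := out = dur_to_onset_alt durs initos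
instance (durs : List Int) (initos : Int) (out : List (Int × Int)) : Decidable (Spec_dur_to_onset durs initos out) := by unfold Spec_dur_to_onset; infer_instance

-- ===== CLAIM (what is proved, stated in full; the proofs are below) =====
def Claim_equal_dur_to_onset : Prop := ∀ (durs : List Int) (initos : Int), Dom_dur_to_onset durs initos → Spec_dur_to_onset durs initos (dur_to_onset durs initos)

-- ===== LEMMAS AND PROOFS =====
lemma pvAccum_ne_nil (x : Int) (l : List Int) : pvAccum x l ≠ [] := by
  cases l <;> simp [pvAccum]

lemma durToOnsetLoopA_eq (durs : List Int) (os : Int) (acc : List (Int × Int)) :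
    durToOnsetLoopA durs os acc = acc ++ durs.zip (pvAccum os durs).dropLast := by
  induction durs generalizing os acc with
  | nil => simp [durToOnsetLoopA, pvAccum]
  | cons d rest ih =>
      rw [durToOnsetLoopA, ih]
      have h := pvAccum_ne_nil (os + d) rest
      simp [pvAccum, List.dropLast_cons_of_ne_nil h]

-- ===== VERDICT (by name: the statement is the Claim_ definition above) =====
theorem dur_to_onset_spec : Claim_equal_dur_to_onset := by
  intro durs initos _
  unfold Spec_dur_to_onset dur_to_onset dur_to_onset_alt
  simpa using durToOnsetLoopA_eq durs initos []
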